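-- pv_equiv track=rewrite | github.com/GeorgeAbda/LETSDOIT | agora/DAG/algorithm/gnnDeepRL/brain.py | separate_embeddings
-- ===== SOURCE A (Python) =====
-- def separate_embeddings(embeddings, num_nodes_per_graph):
--     separated_embeddings = []
--     start_idx = 0
--     for num_nodes in num_nodes_per_graph:
--         end_idx = start_idx + num_nodes
--         separated_embeddings.append(embeddings[start_idx:end_idx])
--         start_idx = end_idx
--     return separated_embeddings
-- ===== SOURCE B (Python) =====
-- def separate_embeddings(embeddings, num_nodes_per_graph):
--     def go(start, sizes):
--         if not sizes:
--             return []
--         if len(sizes) == 1: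
--             return [embeddings[start:start + sizes[0]]]
--         k = len(sizes) // 2
--         left = sizes[:k]
--         return go(start, left) + go(start + sum(left), sizes[k:])
--     return go(0, num_nodes_per_graph)
-- ===== Notes on version B (the rewrite author's own statement) =====
-- stated objective: alternative
-- what changed: Replaces A's left-to-right running-accumulator loop with a divide-and-conquer recursion: split the size list in half, recurse on each half with the right half offset by the left half's sum, and concatenate.
import Mathlib
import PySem

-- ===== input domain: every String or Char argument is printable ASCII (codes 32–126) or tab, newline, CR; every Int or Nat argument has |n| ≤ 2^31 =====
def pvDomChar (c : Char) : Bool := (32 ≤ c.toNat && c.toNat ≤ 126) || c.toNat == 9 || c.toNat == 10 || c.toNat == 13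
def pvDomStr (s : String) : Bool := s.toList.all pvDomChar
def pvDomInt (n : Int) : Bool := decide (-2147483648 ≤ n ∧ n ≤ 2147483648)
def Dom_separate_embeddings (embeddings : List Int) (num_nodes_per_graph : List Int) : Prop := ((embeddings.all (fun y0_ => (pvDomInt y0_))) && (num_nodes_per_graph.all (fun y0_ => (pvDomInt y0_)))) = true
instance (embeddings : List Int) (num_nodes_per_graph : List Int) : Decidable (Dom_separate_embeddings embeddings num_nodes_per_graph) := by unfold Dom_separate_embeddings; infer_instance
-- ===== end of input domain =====

-- B replaces A's running-accumulator loop by a divide-and-conquer recursion over the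
-- size list (objective: alternative; not claimed faster).

-- ===== PORT A =====
-- A: accumulator loop; state = (separated_embeddings, start_idx).
def separate_embeddings (embeddings : List Int) (num_nodes_per_graph : List Int) : List (List Int) :=
  (num_nodes_per_graph.foldl
    (fun (st : List (List Int) × Int) num_nodes =>
      let end_idx := st.2 + num_nodes
      (st.1 ++ [PySem.List.slice embeddings (some st.2) (some end_idx)], end_idx))
    ([], 0)).1

-- ===== PORT B =====
-- B: go start sizes — split sizes at its midpoint, recurse, offset the right half by the
-- left half's sum; base cases: empty list, and one size (a single slice).
def sepGo (embeddings : List Int) (start : Int) (sizes : List Int) : List (List Int) :=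
  match sizes with
  | [] => []
  | [n] => [PySem.List.slice embeddings (some start) (some (start + n))]
  | n1 :: n2 :: rest =>
    let k := (n1 :: n2 :: rest).length / 2
    sepGo embeddings start ((n1 :: n2 :: rest).take k)
      ++ sepGo embeddings (start + ((n1 :: n2 :: rest).take k).sum) ((n1 :: n2 :: rest).drop k)
termination_by sizes.length
decreasing_by
  · simp [List.length_take]; omega
  · simp [List.length_drop]; omega

def separate_embeddings_alt (embeddings : List Int) (num_nodes_per_graph : List Int) : List (List Int) :=
  sepGo embeddings 0 num_nodes_per_graph

-- ===== PRECONDITION & SPEC =====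
def Spec_separate_embeddings (embeddings : List Int) (num_nodes_per_graph : List Int) (out : List (List Int)) : Prop := out = separate_embeddings_alt embeddings num_nodes_per_graph
instance (embeddings : List Int) (num_nodes_per_graph : List Int) (out : List (List Int)) : Decidable (Spec_separate_embeddings embeddings num_nodes_per_graph out) := by unfold Spec_separate_embeddings; infer_instance

-- ===== CLAIM (what is proved, stated in full; the proofs are below) =====
def Claim_equal_separate_embeddings : Prop := ∀ (embeddings : List Int) (num_nodes_per_graph : List Int), Dom_separate_embeddings embeddings num_nodes_per_graph → Spec_separate_embeddings embeddings num_nodes_per_graph (separate_embeddings embeddings num_nodes_per_graph)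

-- ===== LEMMAS AND PROOFS =====
-- Sequential reference: one slice per size, threading the absolute offset.
def sepSeq (embeddings : List Int) (s : Int) : List Int → List (List Int)
  | [] => []
  | n :: t => PySem.List.slice embeddings (some s) (some (s + n)) :: sepSeq embeddings (s + n) t

theorem sepSeq_append (embeddings : List Int) (xs ys : List Int) :
    ∀ s, sepSeq embeddings s (xs ++ ys)
      = sepSeq embeddings s xs ++ sepSeq embeddings (s + xs.sum) ys := by
  induction xs with
  | nil => intro s; simp [sepSeq]
  | cons n t ih =>
      intro s
      simp [sepSeq, ih (s + n), add_assoc]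

theorem foldl_eq_sepSeq (embeddings : List Int) (nums : List Int) :
    ∀ (acc : List (List Int)) (s : Int),
    (nums.foldl
      (fun (st : List (List Int) × Int) num_nodes =>
        let end_idx := st.2 + num_nodes
        (st.1 ++ [PySem.List.slice embeddings (some st.2) (some end_idx)], end_idx))
      (acc, s)).1 = acc ++ sepSeq embeddings s nums := by
  induction nums with
  | nil => intro acc s; simp [sepSeq]
  | cons n t ih =>
      intro acc s
      simp only [List.foldl_cons, sepSeq]
      rw [ih]
      simp

theorem sepGo_eq_sepSeq (embeddings : List Int) :
    ∀ (sizes : List Int) (s : Int), sepGo embeddings s sizes = sepSeq embeddings s sizes := by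
  intro sizes s
  fun_induction sepGo embeddings s sizes with
  | case1 => rfl
  | case2 => simp [sepSeq]
  | case3 s a b t k ih1 ih2 =>
      rw [ih1, ih2]
      conv_rhs => rw [← List.take_append_drop k (a :: b :: t)]
      rw [sepSeq_append]

-- ===== VERDICT (by name: the statement is the Claim_ definition above) =====
theorem separate_embeddings_spec : Claim_equal_separate_embeddings := by
  intro embeddings nums _
  unfold Spec_separate_embeddings separate_embeddings separate_embeddings_alt
  rw [sepGo_eq_sepSeq]
  simpa using foldl_eq_sepSeq embeddings nums [] 0
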